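-- pv_equiv track=rewrite | github.com/DavidBowley/ThinkPython-exercises-2024 | Chapter 9/9.6.py | is_abecedarian
-- ===== SOURCE A (Python) =====
-- def is_abecedarian(s):
--     """ Takes a string (s) and returns True if the string's letters appear in alphabetical order
--     """
--     word = s.lower()        # make sure everything is lowercase for the ord() function to accurately work out relationship between letters
--     last_letter = ''
--
--     for letter in word:
--         current_letter = letter
--         if current_letter < last_letter:
--             return False
--         last_letter = current_letter
--     return True
-- ===== SOURCE B (Python) =====
-- def is_abecedarian(s):
--     word = s.lower()
--     return word == ''.join(sorted(word))
-- ===== Notes on version B (the rewrite author's own statement) =====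
-- stated objective: idiomatic
-- what changed: Replaces the adjacent-pair scan with lowercase-then-compare-against-sorted: the string is abecedarian iff it equals its own sorted form.
import Mathlib
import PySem

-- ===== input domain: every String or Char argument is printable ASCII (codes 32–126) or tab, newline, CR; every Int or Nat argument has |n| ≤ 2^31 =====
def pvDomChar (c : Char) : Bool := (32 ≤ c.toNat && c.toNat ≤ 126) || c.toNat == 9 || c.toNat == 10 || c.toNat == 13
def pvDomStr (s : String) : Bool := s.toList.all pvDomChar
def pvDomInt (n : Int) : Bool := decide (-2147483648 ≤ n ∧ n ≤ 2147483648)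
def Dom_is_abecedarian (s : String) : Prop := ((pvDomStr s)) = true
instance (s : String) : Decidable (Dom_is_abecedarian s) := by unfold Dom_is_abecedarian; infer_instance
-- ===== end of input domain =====

-- B lowercases and compares the string with its sorted form instead of scanning adjacent pairs (idiomatic; not faster).

-- ===== PORT A =====
-- last_letter starts as '' (no previous letter, compares below everything): ported as Option Char,
-- none = '', some l = the one-character string; 'current < last' on one-char strings is Char <.
def isAbecLoop (last : Option Char) (rest : List Char) : Bool :=
  match rest with
  | [] => true
  | c :: cs =>
    match last with
    | none => isAbecLoop (some c) cs
    | some l => if c < l then false else isAbecLoop (some c) cs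

def is_abecedarian (s : String) : Bool :=
  isAbecLoop none (PySem.Str.lower s).toList

-- ===== PORT B =====
def is_abecedarian_alt (s : String) : Bool :=
  let word := (PySem.Str.lower s).toList
  word == PySem.List.sorted word (fun x => x) false

-- ===== PRECONDITION & SPEC =====
def Spec_is_abecedarian (s : String) (out : Bool) : Prop := out = is_abecedarian_alt s
instance (s : String) (out : Bool) : Decidable (Spec_is_abecedarian s out) := by unfold Spec_is_abecedarian; infer_instance

-- ===== CLAIM (what is proved, stated in full; the proofs are below) =====
def Claim_equal_is_abecedarian : Prop := ∀ (s : String), Dom_is_abecedarian s → Spec_is_abecedarian s (is_abecedarian s)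

-- ===== LEMMAS AND PROOFS =====

theorem isAbecLoop_some_eq_chain (l : Char) (xs : List Char) :
    isAbecLoop (some l) xs = true ↔ List.IsChain (· ≤ ·) (l :: xs) := by
  induction xs generalizing l with
  | nil => simp [isAbecLoop]
  | cons c cs ih =>
    simp only [isAbecLoop, List.isChain_cons_cons]
    by_cases h : c < l
    · simp [h, not_le.mpr h]
    · simp [h, ih, not_lt.mp h]

theorem isAbecLoop_none_eq_pairwise (xs : List Char) :
    isAbecLoop none xs = true ↔ xs.Pairwise (· ≤ ·) := by
  cases xs with
  | nil => simp [isAbecLoop]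
  | cons c cs =>
    rw [show isAbecLoop none (c :: cs) = isAbecLoop (some c) cs from rfl,
        isAbecLoop_some_eq_chain, List.isChain_iff_pairwise]

theorem sorted_eq_iff_pairwise (xs : List Char) :
    xs = PySem.List.sorted xs (fun x => x) false ↔ xs.Pairwise (· ≤ ·) := by
  constructor
  · intro h
    have := PySem.List.sorted_pairwise (xs := xs) (key := fun x => x)
    rw [← h] at this
    simpa using this
  · intro h
    exact (PySem.List.sorted_eq_self_of_pairwise (key := fun x => x)
      (xs := xs) (by simpa using h)).symm

-- ===== VERDICT (by name: the statement is the Claim_ definition above) =====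
theorem is_abecedarian_spec : Claim_equal_is_abecedarian := by
  intro s _
  unfold Spec_is_abecedarian is_abecedarian is_abecedarian_alt
  rcases h : isAbecLoop none (PySem.Str.lower s).toList with _ | _
  · rw [eq_comm, beq_eq_false_iff_ne]
    intro hc
    have hp := (sorted_eq_iff_pairwise _).mp hc
    rw [← isAbecLoop_none_eq_pairwise, h] at hp
    exact absurd hp (by simp)
  · rw [eq_comm, beq_iff_eq]
    exact (sorted_eq_iff_pairwise _).mpr ((isAbecLoop_none_eq_pairwise _).mp h)
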